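-- pv_equiv track=rewrite | github.com/loning/mbook-binary | src/binaryuniverse/tests/test_P6.py | _enforce_no11_constraint
-- ===== SOURCE A (Python) =====
-- def _enforce_no11_constraint(pattern: str) -> str:
--     """强制执行no-11约束"""
--     result = ""
--     i = 0
--     while i < len(pattern):
--         if i < len(pattern) - 1 and pattern[i] == '1' and pattern[i+1] == '1':
--             # 遇到"11"，替换为"10"
--             result += "10"
--             i += 2
--         else:
--             result += pattern[i]
--             i += 1
--
--     return result
-- ===== SOURCE B (Python) =====
-- def _enforce_no11_constraint(pattern: str) -> str:
--     """Single-character pass with a last-emitted-character tracker."""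
--     out = []
--     last = ''
--     for c in pattern:
--         if c == '1' and last == '1':
--             out.append('0')
--             last = '0'
--         else:
--             out.append(c)
--             last = c
--     return ''.join(out)
-- ===== Notes on version B (the rewrite author's own statement) =====
-- stated objective: faster
-- what changed: Replaces the lookahead-and-skip-two loop with quadratic string += by a uniform one-char-per-step pass that keeps the last emitted character as lookbehind state and appends into a list joined once at the end.
import Mathlib
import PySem

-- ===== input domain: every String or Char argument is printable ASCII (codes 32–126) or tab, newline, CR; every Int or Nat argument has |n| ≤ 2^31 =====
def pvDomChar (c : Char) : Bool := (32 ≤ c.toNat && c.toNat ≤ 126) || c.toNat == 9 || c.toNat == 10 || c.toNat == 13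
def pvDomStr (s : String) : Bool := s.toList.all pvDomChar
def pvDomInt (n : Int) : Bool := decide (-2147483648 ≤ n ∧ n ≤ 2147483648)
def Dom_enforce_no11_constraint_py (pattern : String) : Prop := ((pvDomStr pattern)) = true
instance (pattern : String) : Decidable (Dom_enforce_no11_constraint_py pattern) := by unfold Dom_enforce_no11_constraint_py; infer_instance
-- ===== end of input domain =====

-- B replaces A's lookahead + stride-2 skip by a uniform one-char pass with a last-emitted-character tracker; same output, different decomposition.


-- ===== PORT A =====
-- A's while-loop: look at pattern[i] and pattern[i+1]; on "11" emit "10" and skip two,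
-- otherwise emit the char and advance one — transcribed as recursion on the char list.
def goA : List Char → List Char
  | [] => []
  | c :: rest =>
    match rest with
    | [] => [c]
    | d :: rest' =>
      if c = '1' ∧ d = '1' then '1' :: '0' :: goA rest'
      else c :: goA (d :: rest')

def enforce_no11_constraint_py (pattern : String) : String :=
  String.ofList (goA pattern.toList)

-- ===== PORT B =====
-- B's for-loop: one char per step, state = (emitted chars, last emitted char; none = '' initially).
def stepB (s : List Char × Option Char) (c : Char) : List Char × Option Char :=
  if c = '1' ∧ s.2 = some '1' then (s.1 ++ ['0'], some '0') else (s.1 ++ [c], some c)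

def enforce_no11_constraint_py_alt (pattern : String) : String :=
  String.ofList (pattern.toList.foldl stepB ([], none)).1

-- ===== PRECONDITION & SPEC =====
def Spec_enforce_no11_constraint_py (pattern : String) (out : String) : Prop := out = enforce_no11_constraint_py_alt pattern
instance (pattern : String) (out : String) : Decidable (Spec_enforce_no11_constraint_py pattern out) := by unfold Spec_enforce_no11_constraint_py; infer_instance

-- ===== CLAIM (what is proved, stated in full; the proofs are below) =====
def Claim_equal_enforce_no11_constraint_py : Prop := ∀ (pattern : String), Dom_enforce_no11_constraint_py pattern → Spec_enforce_no11_constraint_py pattern (enforce_no11_constraint_py pattern)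

-- ===== LEMMAS AND PROOFS =====

-- Non-accumulator form of B's loop body.
def emitB : Option Char → List Char → List Char
  | _, [] => []
  | last, c :: r =>
    if c = '1' ∧ last = some '1' then '0' :: emitB (some '0') r else c :: emitB (some c) r

theorem foldB_eq_emitB (l : List Char) (acc : List Char) (last : Option Char) :
    (l.foldl stepB (acc, last)).1 = acc ++ emitB last l := by
  induction l generalizing acc last with
  | nil => simp [emitB]
  | cons c r ih =>
    simp only [List.foldl, stepB, emitB]
    split <;> simp [ih]

theorem emitB_reset (c : Char) (h : c ≠ '1') (r : List Char) :
    emitB (some c) r = emitB none r := by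
  cases r with
  | nil => rfl
  | cons d r' =>
    have hn : ¬ (d = '1' ∧ (some c : Option Char) = some '1') := by
      rintro ⟨_, hc⟩; exact h (by injection hc)
    simp only [emitB]
    rw [if_neg hn, if_neg (by simp)]

theorem goA_eq_emitB (l : List Char) : goA l = emitB none l := by
  induction l using goA.induct with
  | case1 => rfl
  | case2 c => simp [goA, emitB]
  | case3 c d rest' hcd ih =>
    obtain ⟨hc, hd⟩ := hcd
    subst hc; subst hd
    simp [goA, emitB, emitB_reset '0' (by decide), ih]
  | case4 c d rest' hcd ih =>
    simp only [goA, if_neg hcd]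
    rw [ih]
    by_cases hc : c = '1'
    · have hd : d ≠ '1' := fun hd => hcd ⟨hc, hd⟩
      subst hc
      simp [emitB, hd]
    · have hne : (some c : Option Char) ≠ some '1' := by simpa using hc
      simp [emitB, hne, hc]

-- ===== VERDICT (by name: the statement is the Claim_ definition above) =====
theorem enforce_no11_constraint_py_spec : Claim_equal_enforce_no11_constraint_py := by
  intro pattern _
  unfold Spec_enforce_no11_constraint_py enforce_no11_constraint_py enforce_no11_constraint_py_alt
  rw [foldB_eq_emitB, goA_eq_emitB]
  rfl
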